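-- pv_equiv track=rewrite | github.com/xhsndsy/store | StudyPython/nowcoder/FillArray.py | FillArray
-- ===== SOURCE A (Python) =====
-- def FillArray(a, k):
--     # write code here
--     tmp = []
--     for i in range(len(a)):
--         num = []
--         num.append(a[i])
--         for j in range(1, k + 1):
--             if a[i] == 0 and a[i - 1] <= j:
--                 b = num.pop()
--                 num.append(j)
--         tmp.append(num)
--
--     return tmp
-- ===== SOURCE B (Python) =====
-- def FillArray(a, k):
--     # Single O(n) pass: pair each element with its predecessor (wrapping, as
--     # a[i-1] with i=0 reads a[-1]) and decide directly, no inner scan over j.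
--     prev = a[-1:] + a[:-1]
--     return [[k] if x == 0 and k >= 1 and p <= k else [x] for p, x in zip(prev, a)]
-- ===== Notes on version B (the rewrite author's own statement) =====
-- stated objective: faster
-- what changed: Replaces the O(n*k) nested loop (scanning j=1..k and repeatedly popping/appending to find the last qualifying j) with a single comprehension over the list zipped with its rotation, evaluating the closed-form predicate a[i]==0 and k>=1 and a[i-1]<=k directly.
import Mathlib
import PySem

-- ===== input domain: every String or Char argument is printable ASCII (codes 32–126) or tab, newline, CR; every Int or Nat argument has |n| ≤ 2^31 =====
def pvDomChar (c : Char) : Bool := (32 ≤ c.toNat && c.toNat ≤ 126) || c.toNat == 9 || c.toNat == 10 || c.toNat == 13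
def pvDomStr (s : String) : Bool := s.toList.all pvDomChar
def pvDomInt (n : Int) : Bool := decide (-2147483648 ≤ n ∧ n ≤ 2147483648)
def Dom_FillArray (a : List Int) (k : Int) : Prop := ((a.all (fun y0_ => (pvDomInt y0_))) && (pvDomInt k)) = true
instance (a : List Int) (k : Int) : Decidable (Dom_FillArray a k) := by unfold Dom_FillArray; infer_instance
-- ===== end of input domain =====

-- B replaces A's nested loop (inner scan over j = 1..k) by one pass over the list
-- zipped with its rotation, evaluating the condition in closed form.

-- ===== PORT A =====
-- Literal transliteration: outer loop over range(len(a)); num = [a[i]]; inner loop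
-- over range(1, k+1): b = num.pop(); num.append(j) when the condition holds.
def FillArray (a : List Int) (k : Int) : List (List Int) :=
  (PySem.List.pyRange 0 a.length 1).foldl (fun tmp i =>
    let num : List Int := [PySem.List.pyGetD a i 0]
    let num := (PySem.List.pyRange 1 (k + 1) 1).foldl (fun num j =>
      if PySem.List.pyGetD a i 0 = 0 ∧ PySem.List.pyGetD a (i - 1) 0 ≤ j then
        num.dropLast ++ [j]   -- b = num.pop(); num.append(j)
      else num) num
    tmp ++ [num]) []

-- ===== PORT B =====
-- prev = a[-1:] + a[:-1]; comprehension over zip(prev, a).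
def FillArray_alt (a : List Int) (k : Int) : List (List Int) :=
  let prev := PySem.List.slice a (some (-1)) none ++ PySem.List.slice a none (some (-1))
  (prev.zip a).map (fun px => if px.2 = 0 ∧ 1 ≤ k ∧ px.1 ≤ k then [k] else [px.2])

-- ===== PRECONDITION & SPEC =====
def Spec_FillArray (a : List Int) (k : Int) (out : List (List Int)) : Prop := out = FillArray_alt a k
instance (a : List Int) (k : Int) (out : List (List Int)) : Decidable (Spec_FillArray a k out) := by unfold Spec_FillArray; infer_instance

-- ===== CLAIM (what is proved, stated in full; the proofs are below) =====
def Claim_equal_FillArray : Prop := ∀ (a : List Int) (k : Int), Dom_FillArray a k → Spec_FillArray a k (FillArray a k)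

-- ===== LEMMAS AND PROOFS =====

-- The inner j-loop in closed form: the singleton ends as [m] iff some j in 1..m
-- qualifies (the last such j is m itself), i.e. iff c ∧ 1 ≤ m ∧ p ≤ m.
theorem inner_loop_nat (c : Prop) [Decidable c] (p y : Int) (n : Nat) :
    (PySem.List.pyRange 1 ((n : Int) + 1) 1).foldl
      (fun num j => if c ∧ p ≤ j then num.dropLast ++ [j] else num) [y]
    = if c ∧ 1 ≤ (n : Int) ∧ p ≤ (n : Int) then [(n : Int)] else [y] := by
  induction n with
  | zero =>
    rw [PySem.List.pyRange_one_eq_nil (by norm_num)]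
    simp
  | succ n ih =>
    rw [show ((n + 1 : Nat) : Int) = (n : Int) + 1 by push_cast; ring,
        PySem.List.pyRange_one_succ_right (by omega), List.foldl_append, ih]
    simp only [List.foldl]
    by_cases hc : c
    · by_cases hp : p ≤ (n : Int) + 1
      · by_cases hpn : p ≤ (n : Int) <;> by_cases hn : 1 ≤ (n : Int) <;>
          simp [hc, hp, hpn, hn]
      · have hpn : ¬ p ≤ (n : Int) := by omega
        simp [hc, hp, hpn]
    · simp [hc]

theorem inner_loop (c : Prop) [Decidable c] (p y k : Int) :
    (PySem.List.pyRange 1 (k + 1) 1).foldl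
      (fun num j => if c ∧ p ≤ j then num.dropLast ++ [j] else num) [y]
    = if c ∧ 1 ≤ k ∧ p ≤ k then [k] else [y] := by
  by_cases hk : k ≤ 0
  · rw [PySem.List.pyRange_one_eq_nil (by omega)]
    have : ¬ (c ∧ 1 ≤ k ∧ p ≤ k) := by rintro ⟨_, h, _⟩; omega
    simp [this]
  · have hk' : k = ((k.toNat : Int)) := by omega
    rw [hk']; exact inner_loop_nat c p y k.toNat

-- ===== VERDICT (by name: the statement is the Claim_ definition above) =====
theorem FillArray_spec : Claim_equal_FillArray := by
  intro a k _
  show FillArray a k = FillArray_alt a k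
  unfold FillArray FillArray_alt
  have key : ∀ (l : List Int) (s : List (List Int)),
      List.foldl (fun tmp i =>
        let num : List Int := [PySem.List.pyGetD a i 0]
        let num := (PySem.List.pyRange 1 (k + 1) 1).foldl (fun num j =>
          if PySem.List.pyGetD a i 0 = 0 ∧ PySem.List.pyGetD a (i - 1) 0 ≤ j then
            num.dropLast ++ [j]
          else num) num
        tmp ++ [num]) s l
      = s ++ l.map (fun i =>
          if PySem.List.pyGetD a i 0 = 0 ∧ 1 ≤ k ∧ PySem.List.pyGetD a (i - 1) 0 ≤ k
          then [k] else [PySem.List.pyGetD a i 0]) := by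
    intro l
    induction l with
    | nil => intro s; simp
    | cons x xs ih =>
      intro s
      rw [List.foldl_cons, ih, List.map_cons]
      simp only [inner_loop]
      simp
  rw [key]
  rcases eq_or_ne a [] with rfl | ha
  · rw [PySem.List.pyRange_one_eq_nil (by simp)]
    simp
  · have hn : 1 ≤ a.length := List.length_pos_iff.mpr ha
    rw [PySem.List.slice_from_neg_one, PySem.List.slice_to_neg_one]
    simp only [List.nil_append]
    apply List.ext_getElem
    · simp [PySem.List.length_pyRange_one, List.length_zip, List.length_dropLast,
            List.length_drop]
    · intro t h1 h2
      have ht : t < a.length := by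
        simpa [PySem.List.length_pyRange_one] using h1
      simp only [List.getElem_map, PySem.List.getElem_pyRange_one, List.getElem_zip,
                 zero_add]
      have e1 : PySem.List.pyGetD a ((t : Nat) : Int) 0 = a[t] := by
        rw [PySem.List.pyGetD_natCast]
        exact List.getD_eq_getElem a 0 ht
      have hdl : (a.drop (a.length - 1)).length = 1 := by
        simp [List.length_drop]; omega
      rcases Nat.eq_zero_or_pos t with rfl | htpos
      · have e1' : PySem.List.pyGetD a 0 0 = a[0] := by simpa using e1
        have e2' : PySem.List.pyGetD a (-1) 0 = a.getLast ha :=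
          PySem.List.pyGetD_neg_one a 0 ha
        have e3 : (a.drop (a.length - 1) ++ a.dropLast)[0]'(by
              simp [List.length_drop]; omega) = a.getLast ha := by
          rw [List.getElem_append_left (by omega)]
          rw [List.getElem_drop]
          simp [List.getLast_eq_getElem]
        simp [e1', e2', e3]
      · have e2 : PySem.List.pyGetD a ((t : Nat) - 1 : Int) 0 = a[t - 1] := by
          rw [show ((t : Nat) : Int) - 1 = (((t - 1 : Nat) : Nat) : Int) by omega]
          rw [PySem.List.pyGetD_natCast]
          exact List.getD_eq_getElem a 0 (by omega)
        have e3 : (a.drop (a.length - 1) ++ a.dropLast)[t]'(by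
              simp [List.length_drop, List.length_dropLast]; omega) = a[t - 1] := by
          rw [List.getElem_append_right (by omega)]
          rw [List.getElem_dropLast]
          congr 1
          omega
        simp [e1, e2, e3]
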